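-- pv_equiv track=rewrite | github.com/EbsHirani/LeetCode | number-of-ways-to-rearrange_sticks_with_k_sticks_visible.py | rearrangeSticks
-- ===== SOURCE A (Python) =====
-- def rearrangeSticks(n: int, k: int) -> int:
--     MOD = 1000000007
--     dp = [[-1]*(k+1) for _ in range(n+1)]
--     def recurse(candles, visible):
--         if candles==visible:
--             return 1
--         if candles<visible or visible==0:
--             return 0
--         if dp[candles][visible] !=-1:
--             return dp[candles][visible]
--         ans= recurse(candles-1,visible-1)%MOD + (candles-1)*recurse(candles-1, visible)%MOD
--         dp[candles][visible] = ans%MOD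
--
--         return dp[candles][visible]
--     return recurse(n,k)
-- ===== SOURCE B (Python) =====
-- def rearrangeSticks(n: int, k: int) -> int:
--     MOD = 1000000007
--     if n == k:
--         return 1
--     if k <= 0 or k > n:
--         return 0
--     # bottom-up DP over the Stirling recurrence, rolling 1D row
--     row = [1] + [0] * k
--     for i in range(1, n + 1):
--         for j in range(min(i, k), 0, -1):
--             row[j] = (row[j - 1] + (i - 1) * row[j]) % MOD
--         row[0] = 0
--     return row[k]
-- ===== Notes on version B (the rewrite author's own statement) =====
-- stated objective: alternative
-- what changed: Replaced the top-down memoized recursion with its (n+1)x(k+1) table by a bottom-up iterative DP over a rolling 1D row filled via the same Stirling recurrence.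
import Mathlib
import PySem

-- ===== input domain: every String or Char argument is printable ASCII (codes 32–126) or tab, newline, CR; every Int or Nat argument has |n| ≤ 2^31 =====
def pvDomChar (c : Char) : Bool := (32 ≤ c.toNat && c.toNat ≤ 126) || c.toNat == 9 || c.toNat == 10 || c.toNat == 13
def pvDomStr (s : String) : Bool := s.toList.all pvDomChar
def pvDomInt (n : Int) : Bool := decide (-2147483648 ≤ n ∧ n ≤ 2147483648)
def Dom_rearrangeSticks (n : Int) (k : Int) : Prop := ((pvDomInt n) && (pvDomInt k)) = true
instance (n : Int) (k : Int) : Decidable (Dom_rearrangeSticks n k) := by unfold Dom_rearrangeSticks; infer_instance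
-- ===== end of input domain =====

-- B replaces A's top-down memoized recursion (with its (n+1)x(k+1) table) by a bottom-up
-- iterative DP over a rolling 1D row — an alternative decomposition, same O(n*k) time.

-- ===== PORT A =====
-- A's memo table dp (a (n+1)x(k+1) list of lists filled with -1) is ported as a dictionary
-- keyed by (candles, visible) with default -1: on every input admitted by Pre_ all of A's
-- table accesses are with in-range non-negative indices, where the two are the same store.
-- The fuel argument only makes the recursion total: A's recursion depth is bounded by
-- n.toNat + 1 (each call decreases candles by 1 and stops at candles ≤ visible or visible = 0).
def recurseA : Nat → Int → Int → PySem.Dict (Int × Int) Int → Int × PySem.Dict (Int × Int) Int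
  | 0, _, _, dp => (0, dp)  -- fuel exhausted (never reached from rearrangeSticks)
  | fuel + 1, candles, visible, dp =>
    if candles = visible then (1, dp)
    else if candles < visible ∨ visible = 0 then (0, dp)
    else if dp.getD (candles, visible) (-1) ≠ -1 then (dp.getD (candles, visible) (-1), dp)
    else
      let r1 := recurseA fuel (candles - 1) (visible - 1) dp
      let r2 := recurseA fuel (candles - 1) visible r1.2
      let ans := PySem.Int.mod r1.1 1000000007 +
                 PySem.Int.mod ((candles - 1) * r2.1) 1000000007
      let dp3 := r2.2.insert (candles, visible) (PySem.Int.mod ans 1000000007)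
      (dp3.getD (candles, visible) (-1), dp3)

def rearrangeSticks (n : Int) (k : Int) : Int :=
  (recurseA (n.toNat + 1) n k PySem.Dict.empty).1

-- ===== PORT B =====
def rearrangeSticks_alt (n : Int) (k : Int) : Int :=
  if n = k then 1
  else if k ≤ 0 ∨ n < k then 0
  else
    let row0 : List Int := 1 :: List.replicate k.toNat 0
    let row := (PySem.List.pyRange 1 (n + 1) 1).foldl (fun row i =>
        let row := (PySem.List.pyRange (min i k) 0 (-1)).foldl (fun row j =>
            row.set j.toNat (PySem.Int.mod
              (row.getD (j - 1).toNat 0 + (i - 1) * row.getD j.toNat 0) 1000000007)) row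
        row.set 0 0) row0
    row.getD k.toNat 0

-- ===== PRECONDITION & SPEC =====
-- Pre_ excludes exactly the inputs where A raises IndexError: k < 0 with k < n (negative
-- column index into rows of length k+1 ≤ 0, or an empty table when n < 0).
def Pre_rearrangeSticks (n : Int) (k : Int) : Prop := ¬ (k < 0 ∧ k < n)
instance (n : Int) (k : Int) : Decidable (Pre_rearrangeSticks n k) := by
  unfold Pre_rearrangeSticks; infer_instance

def pvWitness_rearrangeSticks : Int × Int := (5, 3)

def Spec_rearrangeSticks (n : Int) (k : Int) (out : Int) : Prop := out = rearrangeSticks_alt n k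
instance (n : Int) (k : Int) (out : Int) : Decidable (Spec_rearrangeSticks n k out) := by
  unfold Spec_rearrangeSticks; infer_instance

-- ===== CLAIM (what is proved, stated in full; the proofs are below) =====
def Claim_equal_rearrangeSticks : Prop := ∀ (n : Int) (k : Int), Dom_rearrangeSticks n k →
  Pre_rearrangeSticks n k → Spec_rearrangeSticks n k (rearrangeSticks n k)
-- ===== LEMMAS AND PROOFS =====

-- The common mathematical value: Stirling-cycle numbers reduced mod 1000000007,
-- with exactly the mod placement both programs produce.
def S : Nat → Nat → Int
  | 0, 0 => 1
  | 0, _ + 1 => 0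
  | _ + 1, 0 => 0
  | i + 1, j + 1 => PySem.Int.mod (S i j + (i : Int) * S i (j + 1)) 1000000007

lemma S_gt (i j : Nat) (h : i < j) : S i j = 0 := by
  induction i generalizing j with
  | zero => cases j with | zero => omega | succ j => rfl
  | succ i ih =>
    cases j with
    | zero => omega
    | succ j =>
      rw [S, ih j (by omega), ih (j + 1) (by omega)]
      simp [PySem.Int.mod]

lemma S_diag (i : Nat) : S i i = 1 := by
  induction i with
  | zero => rfl
  | succ i ih =>
    rw [S, ih, S_gt i (i + 1) (by omega)]
    simp [PySem.Int.mod]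

-- ---- A side: memoization correctness ----
def InvA (dp : PySem.Dict (Int × Int) Int) : Prop :=
  ∀ c v : Int, 1 ≤ v → v < c → dp.getD (c, v) (-1) ≠ -1 →
    dp.getD (c, v) (-1) = S c.toNat v.toNat

lemma recurseA_correct (fuel : Nat) :
    ∀ (c v : Int) (dp : PySem.Dict (Int × Int) Int), InvA dp → c.toNat < fuel →
      0 ≤ v → v ≤ c →
      (recurseA fuel c v dp).1 = S c.toNat v.toNat ∧ InvA (recurseA fuel c v dp).2 := by
  induction fuel with
  | zero => intro c v dp _ hf _ _; omega
  | succ fuel ih =>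
    intro c v dp hInv hf h0v hvc
    by_cases h1 : c = v
    · subst h1
      simp only [recurseA]
      exact ⟨(S_diag c.toNat).symm, hInv⟩
    · by_cases h2 : c < v ∨ v = 0
      · simp only [recurseA, if_neg h1, if_pos h2]
        have hv0 : v = 0 := by omega
        obtain ⟨m, hm⟩ : ∃ m, c.toNat = m + 1 := ⟨c.toNat - 1, by omega⟩
        rw [hm, hv0]
        exact ⟨rfl, hInv⟩
      · have h1v : 1 ≤ v := by omega
        have hvc' : v < c := by omega
        by_cases h3 : dp.getD (c, v) (-1) ≠ -1
        · simp only [recurseA, if_neg h1, if_neg h2, if_pos h3]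
          exact ⟨hInv c v h1v hvc' h3, hInv⟩
        · have hfc : (c - 1).toNat < fuel := by omega
          have r1 := ih (c - 1) (v - 1) dp hInv hfc (by omega) (by omega)
          have r2 := ih (c - 1) v (recurseA fuel (c - 1) (v - 1) dp).2 r1.2 hfc
            (by omega) (by omega)
          obtain ⟨m, hm⟩ : ∃ m, c.toNat = m + 1 := ⟨c.toNat - 1, by omega⟩
          obtain ⟨t, ht⟩ : ∃ t, v.toNat = t + 1 := ⟨v.toNat - 1, by omega⟩
          have hcm : c - 1 = ((m : Nat) : Int) := by omega
          have hvt : v - 1 = ((t : Nat) : Int) := by omega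
          have hstore : PySem.Int.mod
              (PySem.Int.mod (recurseA fuel (c - 1) (v - 1) dp).1 1000000007 +
               PySem.Int.mod ((c - 1) *
                 (recurseA fuel (c - 1) v (recurseA fuel (c - 1) (v - 1) dp).2).1) 1000000007)
              1000000007 = S c.toNat v.toNat := by
            rw [r1.1, r2.1, hm, ht, S]
            have h1t : (c - 1).toNat = m := by omega
            have h2t : (v - 1).toNat = t := by omega
            rw [h1t, h2t, hcm]
            rw [PySem.Int.mod_eq_emod_of_pos (by norm_num),
              PySem.Int.mod_eq_emod_of_pos (by norm_num),
              PySem.Int.mod_eq_emod_of_pos (by norm_num),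
              PySem.Int.mod_eq_emod_of_pos (by norm_num)]
            conv_rhs => rw [Int.add_emod]
          simp only [recurseA, if_neg h1, if_neg h2, if_neg h3]
          constructor
          · rw [PySem.Dict.getD_insert, if_pos rfl]
            exact hstore
          · intro c' v' h1' h2' h3'
            rw [PySem.Dict.getD_insert] at h3' ⊢
            by_cases he : (c', v') = (c, v)
            · rw [if_pos he]
              have hcc : c' = c := congrArg Prod.fst he
              have hvv : v' = v := congrArg Prod.snd he
              rw [hcc, hvv]
              exact hstore
            · rw [if_neg he] at h3' ⊢
              exact r2.2 c' v' h1' h2' h3'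

-- ---- B side: the rolling row equals one row of S ----

lemma getD_set_ne (l : List Int) (p q : Nat) (x : Int) (h : q ≠ p) :
    (l.set p x).getD q 0 = l.getD q 0 := by
  rw [List.getD, List.getD, List.getElem?_set, if_neg (Ne.symm h)]

lemma getD_set_self (l : List Int) (p : Nat) (x : Int) (h : p < l.length) :
    (l.set p x).getD p 0 = x := by
  simp [List.getD, h]

lemma innerB (i : Int) (m : Nat) :
    ∀ (row : List Int), m < row.length →
      ∀ t : Nat,
        ((PySem.List.pyRange (m : Int) 0 (-1)).foldl (fun row j =>
            row.set j.toNat (PySem.Int.mod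
              (row.getD (j - 1).toNat 0 + (i - 1) * row.getD j.toNat 0) 1000000007)) row).getD t 0
        = if 1 ≤ t ∧ t ≤ m then
            PySem.Int.mod (row.getD (t - 1) 0 + (i - 1) * row.getD t 0) 1000000007
          else row.getD t 0 := by
  induction m with
  | zero =>
    intro row _ t
    rw [PySem.List.pyRange_neg_one_eq_nil (by omega)]
    simp only [List.foldl_nil]
    have : ¬ (1 ≤ t ∧ t ≤ 0) := by omega
    rw [if_neg this]
  | succ m ih =>
    intro row hlen t
    rw [PySem.List.pyRange_neg_one_cons (by exact_mod_cast Nat.zero_lt_succ m)]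
    simp only [List.foldl_cons]
    have hc1 : ((m + 1 : Nat) : Int).toNat = m + 1 := by simp
    have hc3 : ((m + 1 : Nat) : Int) - 1 = (m : Int) := by push_cast; ring
    rw [hc3, hc1]
    simp only [Int.toNat_natCast]
    have hlen' : m < (row.set (m + 1)
        (PySem.Int.mod (row.getD m 0 + (i - 1) * row.getD (m + 1) 0) 1000000007)).length := by
      rw [List.length_set]; omega
    rw [ih _ hlen' t]
    by_cases h1 : 1 ≤ t ∧ t ≤ m
    · rw [if_pos h1, if_pos (by omega)]
      rw [getD_set_ne _ _ _ _ (by omega), getD_set_ne _ _ _ _ (by omega)]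
    · rw [if_neg h1]
      by_cases h2 : t = m + 1
      · subst h2
        rw [if_pos (by omega), getD_set_self _ _ _ hlen]
        congr 1
      · rw [if_neg (by omega), getD_set_ne _ _ _ _ h2]

def rowVec (K i : Nat) : List Int := (List.range (K + 1)).map (fun j => S i j)

lemma rowVec_getD (K i t : Nat) (h : t ≤ K) : (rowVec K i).getD t 0 = S i t := by
  simp [rowVec, List.getD, Nat.lt_succ_of_le h]

lemma rowVec_length (K i : Nat) : (rowVec K i).length = K + 1 := by
  simp [rowVec]

lemma innerB_length (i : Int) (js : List Int) :
    ∀ row : List Int, (js.foldl (fun row j =>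
        row.set j.toNat (PySem.Int.mod
          (row.getD (j - 1).toNat 0 + (i - 1) * row.getD j.toNat 0) 1000000007)) row).length
      = row.length := by
  induction js with
  | nil => intro row; rfl
  | cons j js ih => intro row; rw [List.foldl_cons, ih, List.length_set]

lemma outerB_step (K a : Nat) (hK : 1 ≤ K) :
    ((PySem.List.pyRange (min ((a : Int) + 1) (K : Int)) 0 (-1)).foldl (fun row j =>
        row.set j.toNat (PySem.Int.mod
          (row.getD (j - 1).toNat 0 + ((a : Int) + 1 - 1) * row.getD j.toNat 0) 1000000007))
      (rowVec K a)).set 0 0 = rowVec K (a + 1) := by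
  have hmin : min ((a : Int) + 1) (K : Int) = ((min (a + 1) K : Nat) : Int) := by
    push_cast; ring_nf
  rw [hmin]
  have hm : min (a + 1) K < (rowVec K a).length := by rw [rowVec_length]; omega
  apply List.ext_getElem
  · rw [List.length_set, innerB_length, rowVec_length, rowVec_length]
  · intro t h1 h2
    rw [← List.getD_eq_getElem _ 0 h1, ← List.getD_eq_getElem _ 0 h2]
    have hlenL : t ≤ K := by
      have := h2; rw [rowVec_length] at this; omega
    cases t with
    | zero =>
      rw [getD_set_self _ _ _ (by rw [innerB_length, rowVec_length]; omega)]
      rw [rowVec_getD K (a + 1) 0 (by omega)]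
      rfl
    | succ t =>
      rw [getD_set_ne _ _ _ _ (by omega)]
      rw [innerB ((a : Int) + 1) (min (a + 1) K) (rowVec K a) hm (t + 1)]
      have ha1 : (a : Int) + 1 - 1 = (a : Int) := by ring
      rw [rowVec_getD K (a + 1) (t + 1) hlenL]
      by_cases hcase : 1 ≤ t + 1 ∧ t + 1 ≤ min (a + 1) K
      · rw [if_pos hcase, ha1]
        simp only [Nat.add_sub_cancel]
        rw [rowVec_getD K a t (by omega), rowVec_getD K a (t + 1) hlenL]
        rw [S]
      · rw [if_neg hcase]
        rw [rowVec_getD K a (t + 1) hlenL]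
        have hat : a < t + 1 := by omega
        rw [S_gt a (t + 1) hat, S_gt (a + 1) (t + 1) (by omega)]

lemma rowVec_zero (K : Nat) : rowVec K 0 = 1 :: List.replicate K 0 := by
  unfold rowVec
  rw [List.range_succ_eq_map, List.map_cons, List.map_map]
  refine congrArg₂ _ rfl ?_
  rw [List.eq_replicate_iff]
  refine ⟨by simp, ?_⟩
  intro b hb
  rw [List.mem_map] at hb
  obtain ⟨j, _, rfl⟩ := hb
  rfl

lemma outerB (K : Nat) (hK : 1 ≤ K) (N : Nat) :
    (PySem.List.pyRange 1 ((N : Int) + 1) 1).foldl (fun row (i : Int) =>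
      ((PySem.List.pyRange (min i (K : Int)) 0 (-1)).foldl (fun row j =>
          row.set j.toNat (PySem.Int.mod
            (row.getD (j - 1).toNat 0 + (i - 1) * row.getD j.toNat 0) 1000000007)) row).set 0 0)
      (1 :: List.replicate K 0) = rowVec K N := by
  induction N with
  | zero =>
    rw [show ((0 : Nat) : Int) + 1 = 1 by norm_num,
      PySem.List.pyRange_one_eq_nil (le_refl (1 : Int)), List.foldl_nil, rowVec_zero]
  | succ N ih =>
    rw [show ((N + 1 : Nat) : Int) + 1 = ((N : Int) + 1) + 1 by push_cast; ring,
      PySem.List.pyRange_one_succ_right (by omega : (1 : Int) ≤ (N : Int) + 1),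
      List.foldl_append, ih, List.foldl_cons, List.foldl_nil]
    exact outerB_step K N hK

-- ===== VERDICT (by name: the statement is the Claim_ definition above) =====
lemma InvA_empty : InvA PySem.Dict.empty := by
  intro c v _ _ h3
  exfalso
  exact h3 (by simp [pysem])

theorem rearrangeSticks_spec : Claim_equal_rearrangeSticks := by
  intro n k _ hpre
  unfold Pre_rearrangeSticks at hpre
  unfold Spec_rearrangeSticks rearrangeSticks rearrangeSticks_alt
  by_cases h1 : n = k
  · subst h1
    rw [if_pos rfl]
    simp only [recurseA]
    rw [if_pos trivial]
  · rw [if_neg h1]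
    by_cases h2 : k ≤ 0 ∨ n < k
    · rw [if_pos h2]
      have hcond : n < k ∨ k = 0 := by omega
      simp only [recurseA, if_neg h1, if_pos hcond]
    · rw [if_neg h2]
      push Not at h2
      have hk0 : 0 < k := h2.1
      have hkn : k < n := by omega
      have hA := recurseA_correct (n.toNat + 1) n k PySem.Dict.empty InvA_empty
        (by omega) (by omega) (by omega)
      rw [hA.1]
      have hkc : k = ((k.toNat : Nat) : Int) := by omega
      have hnc : n + 1 = ((n.toNat : Nat) : Int) + 1 := by omega
      rw [hkc, hnc]
      simp only [Int.toNat_natCast]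
      rw [outerB k.toNat (by omega) n.toNat,
        rowVec_getD k.toNat n.toNat k.toNat (le_refl _)]
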